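-- pv_equiv track=rewrite | github.com/MarkHaddad-ISC/Churn_Attrition-Analysis | Functions/DateFilteringForTimelineData.py | build_max_value_dict
-- ===== SOURCE A (Python) =====
-- def build_max_value_dict(keys, values):
--     """
--     Takes two lists: keys and values.
--     Returns a dictionary where each unique key maps to the highest value found at matching indices.
--     """
--     result = {}
--     for key, value in zip(keys, values):
--         key = key.strip()  # Remove leading/trailing whitespace
--         if key in result:
--             result[key] = max(result[key], value)
--         else:
--             result[key] = value
--     return result
-- ===== SOURCE B (Python) =====
-- def build_max_value_dict(keys, values):
--     """
--     Two passes instead of an inline running max: first group every value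
--     under its stripped key, then reduce each group with max().
--     """
--     groups = {}
--     for key, value in zip(keys, values):
--         groups.setdefault(key.strip(), []).append(value)
--     return {k: max(vs) for k, vs in groups.items()}
-- ===== Notes on version B (the rewrite author's own statement) =====
-- stated objective: alternative
-- what changed: Replaces the inline running-max fold with a two-pass decomposition: a grouping pass collecting every value per stripped key into lists, then a separate reduction pass taking max of each group.
import Mathlib
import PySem

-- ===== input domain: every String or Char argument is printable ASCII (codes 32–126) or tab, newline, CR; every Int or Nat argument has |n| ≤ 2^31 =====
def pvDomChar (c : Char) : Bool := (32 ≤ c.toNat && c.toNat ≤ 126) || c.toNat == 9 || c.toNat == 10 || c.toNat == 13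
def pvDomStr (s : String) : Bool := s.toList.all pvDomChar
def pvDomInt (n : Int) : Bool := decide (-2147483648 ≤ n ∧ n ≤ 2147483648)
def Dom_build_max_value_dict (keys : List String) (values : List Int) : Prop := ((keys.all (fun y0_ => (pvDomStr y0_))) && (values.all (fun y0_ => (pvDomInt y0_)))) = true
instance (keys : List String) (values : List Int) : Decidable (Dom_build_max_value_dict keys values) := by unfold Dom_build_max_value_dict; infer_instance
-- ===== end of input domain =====

-- B replaces A's inline running-max fold by a grouping pass (per-key value lists) followed by a
-- separate max-reduction pass; same result, alternative decomposition (no speed claim).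


-- ===== PORT A =====
def build_max_value_dict (keys : List String) (values : List Int) : List (String × Int) :=
  ((keys.zip values).foldl (fun result kv =>
      let key := PySem.Str.strip kv.1
      if result.contains key then
        result.insert key (max (result.getD key 0) kv.2)
      else
        result.insert key kv.2)
    PySem.Dict.empty).items

-- ===== PORT B =====
-- max(vs) of a group; every group built below is nonempty, so max? is always some here.
def pymaxList (vs : List Int) : Int := (PySem.List.max? vs id).getD 0

def build_max_value_dict_alt (keys : List String) (values : List Int) : List (String × Int) :=
  let groups := (keys.zip values).foldl (fun groups kv =>
      groups.modify (PySem.Str.strip kv.1) [] (· ++ [kv.2]))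
    PySem.Dict.empty
  groups.items.map (fun p => (p.1, pymaxList p.2))

-- ===== PRECONDITION & SPEC =====
def Spec_build_max_value_dict (keys : List String) (values : List Int) (out : List (String × Int)) : Prop := out = build_max_value_dict_alt keys values
instance (keys : List String) (values : List Int) (out : List (String × Int)) : Decidable (Spec_build_max_value_dict keys values out) := by unfold Spec_build_max_value_dict; infer_instance

-- ===== CLAIM (what is proved, stated in full; the proofs are below) =====
def Claim_equal_build_max_value_dict : Prop := ∀ (keys : List String) (values : List Int), Dom_build_max_value_dict keys values → Spec_build_max_value_dict keys values (build_max_value_dict keys values)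

-- ===== LEMMAS AND PROOFS =====

-- a group dict viewed through per-group max, as B's final pass computes it
def mapmax (d : PySem.Dict String (List Int)) : PySem.Dict String Int :=
  PySem.Dict.mk (d.items.map (fun p => (p.1, pymaxList p.2)))

theorem items_mapmax (d : PySem.Dict String (List Int)) :
    (mapmax d).items = d.items.map (fun p => (p.1, pymaxList p.2)) := rfl

theorem contains_mapmax (d : PySem.Dict String (List Int)) (c : String) :
    (mapmax d).contains c = d.contains c := by
  simp [mapmax, PySem.Dict.contains, List.any_map, Function.comp_def]

theorem get?_mapmax (d : PySem.Dict String (List Int)) (c : String) :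
    (mapmax d).get? c = (d.get? c).map pymaxList := by
  simp [mapmax, PySem.Dict.get?, List.find?_map, Function.comp_def, Option.map_map]

theorem foldl_some_of_some {α β : Type} (f : Option β → α → Option β)
    (hf : ∀ (b : β) (x : α), ∃ b', f (some b) x = some b') :
    ∀ (l : List α) (b : β), ∃ b', l.foldl f (some b) = some b' := by
  intro l
  induction l with
  | nil => exact fun b => ⟨b, rfl⟩
  | cons y ys ih =>
    intro b
    obtain ⟨b', hb'⟩ := hf b y
    simpa only [List.foldl_cons, hb'] using ih b'

theorem max?_ne_none (vs : List Int) (h : vs ≠ []) :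
    ∃ mm, PySem.List.max? vs id = some mm := by
  cases vs with
  | nil => exact absurd rfl h
  | cons x xs =>
    exact foldl_some_of_some _
      (fun b x => by dsimp only; split <;> exact ⟨_, rfl⟩) xs x

theorem max?_append_singleton (vs : List Int) (v mm : Int)
    (h : PySem.List.max? vs id = some mm) :
    PySem.List.max? (vs ++ [v]) id = some (max mm v) := by
  have : PySem.List.max? (vs ++ [v]) id =
      (if id mm < id v then some v else some mm) := by
    simp only [PySem.List.max?, List.foldl_append] at *
    rw [h]
    rfl
  rw [this]

  split_ifs with hlt <;> simp only [id_eq] at hlt <;> simp [max_def] <;> omega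

theorem pymaxList_append (vs : List Int) (v : Int) (h : vs ≠ []) :
    pymaxList (vs ++ [v]) = max (pymaxList vs) v := by
  obtain ⟨mm, hmm⟩ := max?_ne_none vs h
  simp [pymaxList, hmm, max?_append_singleton vs v mm hmm]

theorem step_mapmax (dB : PySem.Dict String (List Int))
    (hne : ∀ p ∈ dB.items, p.2 ≠ []) (k : String) (v : Int) :
    mapmax (dB.insert k (dB.getD k [] ++ [v])) =
      (if (mapmax dB).contains k then
        (mapmax dB).insert k (max ((mapmax dB).getD k 0) v)
      else
        (mapmax dB).insert k v) := by
  rw [contains_mapmax]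
  by_cases hc : dB.contains k = true
  · -- key present: both sides replace in place
    obtain ⟨vs, hvs⟩ : ∃ vs, dB.get? k = some vs := by
      have := PySem.Dict.contains_eq_isSome_get? dB k
      rw [hc] at this
      exact Option.isSome_iff_exists.mp this.symm
    have hvsne : vs ≠ [] := by
      unfold PySem.Dict.get? at hvs
      obtain ⟨p, hfind, hsnd⟩ := Option.map_eq_some_iff.mp hvs
      exact hsnd ▸ hne p (List.mem_of_find?_eq_some hfind)
    have hgd : dB.getD k [] = vs := by simp [PySem.Dict.getD, hvs]
    have hgd' : (mapmax dB).getD k 0 = pymaxList vs := by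
      simp [PySem.Dict.getD, get?_mapmax, hvs]
    have hcm : (mapmax dB).contains k = true := by rw [contains_mapmax]; exact hc
    rw [hc, if_pos rfl]
    apply PySem.Dict.ext
    rw [items_mapmax, PySem.Dict.items_insert_of_contains _ _ hc,
        PySem.Dict.items_insert_of_contains _ _ hcm, items_mapmax]
    simp only [List.map_map]
    apply List.map_congr_left
    intro p _
    by_cases hp : p.1 == k <;>
      simp [Function.comp, hp, hgd, hgd', pymaxList_append vs v hvsne]
  · -- fresh key: both sides append
    have hcm : ¬ (mapmax dB).contains k = true := by rw [contains_mapmax]; exact hc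
    have hgd : dB.getD k [] = [] :=
      PySem.Dict.getD_of_not_contains _ _ (eq_false_of_ne_true hc)
    rw [if_neg hc]
    apply PySem.Dict.ext
    rw [items_mapmax, PySem.Dict.items_insert_of_not_contains _ _ (eq_false_of_ne_true hc),
        PySem.Dict.items_insert_of_not_contains _ _ (eq_false_of_ne_true hcm), items_mapmax]
    simp only [hgd, List.map_append, List.map_cons, List.map_nil, List.nil_append]
    rfl

theorem insert_preserves_nonempty (dB : PySem.Dict String (List Int))
    (hne : ∀ p ∈ dB.items, p.2 ≠ []) (k : String) (v : Int) :
    ∀ p ∈ (dB.insert k (dB.getD k [] ++ [v])).items, p.2 ≠ [] := by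
  intro p hp
  rcases (PySem.Dict.mem_items_insert _ _ _ _).mp hp with h | h
  · subst h; simp
  · exact hne _ h.1

theorem loop_mapmax (l : List (String × Int)) :
    ∀ (dB : PySem.Dict String (List Int)), (∀ p ∈ dB.items, p.2 ≠ []) →
    l.foldl (fun result kv =>
        let key := PySem.Str.strip kv.1
        if result.contains key then
          result.insert key (max (result.getD key 0) kv.2)
        else
          result.insert key kv.2) (mapmax dB) =
      mapmax (l.foldl (fun groups kv =>
        groups.modify (PySem.Str.strip kv.1) [] (· ++ [kv.2])) dB) := by
  induction l with
  | nil => intro dB _; rfl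
  | cons kv rest ih =>
    intro dB hne
    simp only [List.foldl_cons]
    rw [← step_mapmax dB hne (PySem.Str.strip kv.1) kv.2]
    exact ih _ (insert_preserves_nonempty dB hne _ _)

-- ===== VERDICT (by name: the statement is the Claim_ definition above) =====
theorem build_max_value_dict_spec : Claim_equal_build_max_value_dict := by
  intro keys values _
  show build_max_value_dict keys values = build_max_value_dict_alt keys values
  unfold build_max_value_dict build_max_value_dict_alt
  have h := loop_mapmax (keys.zip values) PySem.Dict.empty (by intro p hp; simp [PySem.Dict.empty] at hp)
  have he : mapmax PySem.Dict.empty = PySem.Dict.empty := rfl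
  rw [he] at h
  rw [h]
  rfl
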